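-- pv_equiv track=rewrite | github.com/VelichkinPetr/storage_recipes | bl_lower.py | ingredient_in_catalog
-- ===== SOURCE A (Python) =====
-- def ingredient_in_catalog(list_search_ingredient:list[str],matrix_ingredient:list[list[str]],list_lines_file:list[str]) -> list[str]:
--     list_recipe = []
--     for search in list_search_ingredient:
--         for i in range(len(matrix_ingredient)):
--             for j in range(len(matrix_ingredient[i])):
--                 if search in matrix_ingredient[i][j] and list_lines_file[i] not in list_recipe:
--                     list_recipe.append(list_lines_file[i])
--     return list_recipe
-- ===== SOURCE B (Python) =====
-- def _first_match(list_search_ingredient, row):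
--     for k, s in enumerate(list_search_ingredient):
--         if any(s in cell for cell in row):
--             return k
--     return None
--
-- def ingredient_in_catalog(list_search_ingredient, matrix_ingredient, list_lines_file):
--     # Bucket each row's line under the first search ingredient that hits it,
--     # then emit the buckets in search order, deduplicating by line value.
--     buckets = [[] for _ in list_search_ingredient]
--     for i, row in enumerate(matrix_ingredient):
--         k = _first_match(list_search_ingredient, row)
--         if k is not None:
--             buckets[k].append(list_lines_file[i])
--     list_recipe = []
--     for bucket in buckets:
--         for line in bucket:
--             if line not in list_recipe:
--                 list_recipe.append(line)
--     return list_recipe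
-- ===== Notes on version B (the rewrite author's own statement) =====
-- stated objective: faster
-- what changed: Instead of A's one full matrix scan per search ingredient with a result-membership test repeated for every matching cell, B makes a single row-major pass that buckets each row's line under the first matching search ingredient (stopping at the first hit), then concatenates the buckets in search order with one value-based dedup per row.
import Mathlib
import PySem

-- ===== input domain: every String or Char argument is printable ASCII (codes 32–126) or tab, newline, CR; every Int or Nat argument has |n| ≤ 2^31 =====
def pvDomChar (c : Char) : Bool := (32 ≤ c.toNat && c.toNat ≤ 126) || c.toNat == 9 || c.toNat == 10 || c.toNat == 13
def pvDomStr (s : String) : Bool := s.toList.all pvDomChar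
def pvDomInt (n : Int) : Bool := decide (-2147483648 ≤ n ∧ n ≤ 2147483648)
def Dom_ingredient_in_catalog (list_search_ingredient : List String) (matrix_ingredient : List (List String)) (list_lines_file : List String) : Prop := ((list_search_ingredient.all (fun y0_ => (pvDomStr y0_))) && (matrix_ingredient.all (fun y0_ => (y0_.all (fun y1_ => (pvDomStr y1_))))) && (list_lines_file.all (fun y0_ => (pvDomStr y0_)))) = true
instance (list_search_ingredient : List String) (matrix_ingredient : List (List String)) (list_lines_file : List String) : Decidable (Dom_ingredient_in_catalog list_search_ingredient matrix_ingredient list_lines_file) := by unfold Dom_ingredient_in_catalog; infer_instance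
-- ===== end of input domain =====

-- B replaces A's per-search full matrix scans by one row-major pass that buckets each row's
-- line under its first matching search ingredient, then emits buckets in search order with a
-- final value dedup (objective: alternative; same result, proved equal).


-- ===== PORT A =====
-- Literal transliteration of A: for each search, scan all rows and cells, appending the row's
-- line when the cell contains the search and the line is not yet collected.  The indices i, j
-- come from range(len(...)), hence are nonnegative, so Nat ranges with getD are exact; Python's
-- list_lines_file[i] (IndexError when i ≥ len(list_lines_file), excluded by Pre_) is rendered
-- total with getD "".
def ingredient_in_catalog (list_search_ingredient : List String) (matrix_ingredient : List (List String)) (list_lines_file : List String) : List String :=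
  list_search_ingredient.foldl (fun list_recipe search =>
    (List.range matrix_ingredient.length).foldl (fun list_recipe i =>
      (List.range ((matrix_ingredient.getD i []).length)).foldl (fun list_recipe j =>
        if PySem.Str.isIn search ((matrix_ingredient.getD i []).getD j "")
            && !(list_recipe.contains (list_lines_file.getD i "")) then
          list_recipe ++ [list_lines_file.getD i ""]
        else list_recipe) list_recipe) list_recipe) []

-- ===== PORT B =====
-- helper of B (_first_match in Source B): index of the first search ingredient hitting some cell
-- of the row, carried with the running counter k
def pyFirstMatch : List String → List String → Nat → Option Nat
  | [], _, _ => none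
  | s :: rest, row, k =>
    if row.any (fun cell => PySem.Str.isIn s cell) then some k else pyFirstMatch rest row (k + 1)

-- Literal transliteration of B (Source B): bucket each row's line under its first matching search
-- ingredient, then emit buckets in search order, deduplicating by line value.
-- Python's list_lines_file[i] is rendered total with pyGetD (IndexError excluded by Pre_).
def ingredient_in_catalog_alt (list_search_ingredient : List String) (matrix_ingredient : List (List String)) (list_lines_file : List String) : List String :=
  let buckets0 : List (List String) := list_search_ingredient.map (fun _ => ([] : List String))
  let buckets := (PySem.List.enumerate matrix_ingredient).foldl (fun bs p =>
      match pyFirstMatch list_search_ingredient p.2 0 with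
      | some k => bs.set k ((bs.getD k []) ++ [PySem.List.pyGetD list_lines_file p.1 ""])
      | none => bs) buckets0
  buckets.foldl (fun list_recipe bucket =>
    bucket.foldl (fun list_recipe line =>
      if list_recipe.contains line then list_recipe else list_recipe ++ [line]) list_recipe) []

-- ===== PRECONDITION & SPEC =====
-- Pre_ excludes exactly the inputs where Python A raises IndexError: some row whose cells
-- contain a search ingredient but whose index has no line in list_lines_file.
def Pre_ingredient_in_catalog (list_search_ingredient : List String) (matrix_ingredient : List (List String)) (list_lines_file : List String) : Prop :=
  ∀ i, i < matrix_ingredient.length →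
    ((matrix_ingredient.getD i []).any (fun cell =>
        list_search_ingredient.any (fun s => PySem.Str.isIn s cell))) = true →
    i < list_lines_file.length
instance (list_search_ingredient : List String) (matrix_ingredient : List (List String)) (list_lines_file : List String) : Decidable (Pre_ingredient_in_catalog list_search_ingredient matrix_ingredient list_lines_file) := by unfold Pre_ingredient_in_catalog; infer_instance

def pvWitness_ingredient_in_catalog : List String × List (List String) × List String :=
  (["salt"], [["sea salt", "water"], ["flour"]], ["soup", "bread"])

def Spec_ingredient_in_catalog (list_search_ingredient : List String) (matrix_ingredient : List (List String)) (list_lines_file : List String) (out : List String) : Prop := out = ingredient_in_catalog_alt list_search_ingredient matrix_ingredient list_lines_file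
instance (list_search_ingredient : List String) (matrix_ingredient : List (List String)) (list_lines_file : List String) (out : List String) : Decidable (Spec_ingredient_in_catalog list_search_ingredient matrix_ingredient list_lines_file out) := by unfold Spec_ingredient_in_catalog; infer_instance

-- ===== CLAIM (what is proved, stated in full; the proofs are below) =====
def Claim_equal_ingredient_in_catalog : Prop := ∀ (list_search_ingredient : List String) (matrix_ingredient : List (List String)) (list_lines_file : List String), Dom_ingredient_in_catalog list_search_ingredient matrix_ingredient list_lines_file → Pre_ingredient_in_catalog list_search_ingredient matrix_ingredient list_lines_file → Spec_ingredient_in_catalog list_search_ingredient matrix_ingredient list_lines_file (ingredient_in_catalog list_search_ingredient matrix_ingredient list_lines_file)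

-- ===== LEMMAS AND PROOFS =====

-- proof-side vocabulary: does some cell of the row contain the search string?
def rowHit (row : List String) (s : String) : Bool := row.any (fun cell => PySem.Str.isIn s cell)

-- clean structural form of pyFirstMatch: index of the first search hitting the row
def fm (S : List String) (row : List String) : Option Nat :=
  match S with
  | [] => none
  | s :: rest => if rowHit row s then some 0 else (fm rest row).map (· + 1)

-- each row paired with its (getD-total) line from list_lines_file
def pairsOf : List (List String) → List String → List (List String × String)
  | [], _ => []
  | row :: M', L => (row, L.getD 0 "") :: pairsOf M' (L.drop 1)

-- value-based dedup with accumulator (the 'if not in: append' fold both programs use)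
def dstep (a : List String) (x : String) : List String := if a.contains x then a else a ++ [x]
def dedupF (acc : List String) (xs : List String) : List String := xs.foldl dstep acc

-- the common normal form both ports are reduced to (A with blocks indexed by the search
-- string, B with blocks indexed by first-match position k, modulo a 'covered' predicate c)
def blocksA (l : List (List String × String)) (S : List String) : List String :=
  S.flatMap (fun s => (l.filter (fun p => rowHit p.1 s)).map Prod.snd)
def blocksB (l : List (List String × String)) (S : List String) (c : List String × String → Bool) : List String :=
  (List.range S.length).flatMap (fun k => (l.filter (fun p => !(c p) && (fm S p.1 == some k))).map Prod.snd)

-- ---- generic dedup lemmas ----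
theorem dedupF_append (acc xs ys : List String) :
    dedupF acc (xs ++ ys) = dedupF (dedupF acc xs) ys := by
  simp [dedupF, List.foldl_append]

theorem dedupF_cons (acc : List String) (x : String) (xs : List String) :
    dedupF acc (x :: xs) = dedupF (dstep acc x) xs := rfl

theorem mem_dstep_left {x : String} (acc : List String) (y : String) (h : x ∈ acc) :
    x ∈ dstep acc y := by
  unfold dstep; split
  · exact h
  · exact List.mem_append_left _ h

theorem mem_dedupF_left {x : String} (acc xs : List String) (h : x ∈ acc) :
    x ∈ dedupF acc xs := by
  induction xs generalizing acc with
  | nil => exact h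
  | cons y ys ih => exact (dedupF_cons acc y ys) ▸ ih _ (mem_dstep_left acc y h)

theorem mem_dedupF_right {x : String} (acc xs : List String) (h : x ∈ xs) :
    x ∈ dedupF acc xs := by
  induction xs generalizing acc with
  | nil => cases h
  | cons y ys ih =>
    rw [dedupF_cons]
    rcases List.mem_cons.1 h with rfl | hx
    · apply mem_dedupF_left
      unfold dstep; split
      · next hc => exact List.mem_of_elem_eq_true hc
      · exact List.mem_append_right _ (List.mem_singleton.2 rfl)
    · exact ih _ hx

-- a guarded conditional-append fold is dedupF of the filtered, mapped list
theorem foldl_guard_dedup {P : Type} (q : P → Bool) (f : P → String) :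
    ∀ (l : List P) (acc : List String),
      l.foldl (fun a p => if q p && !(a.contains (f p)) then a ++ [f p] else a) acc
        = dedupF acc ((l.filter q).map f) := by
  intro l
  induction l with
  | nil => intro acc; simp [dedupF]
  | cons p l ih =>
    intro acc
    rw [List.foldl_cons]
    by_cases hq : q p = true
    · rw [List.filter_cons_of_pos hq, List.map_cons, dedupF_cons, ← ih]
      congr 1
      simp only [hq, Bool.true_and, dstep]
      by_cases hc : acc.contains (f p) = true <;> simp
    · have hqf : q p = false := by simpa using hq
      rw [List.filter_cons_of_neg (by simp [hqf]), ← ih]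
      congr 1
      simp [hqf]

-- dropping already-collected elements from a filter does not change the dedup
theorem dedupF_filter_absorb {P : Type} (q r : P → Bool) (f : P → String) :
    ∀ (l : List P) (acc : List String), (∀ p ∈ l, q p = true → r p = false → f p ∈ acc) →
      dedupF acc ((l.filter q).map f) = dedupF acc ((l.filter (fun p => r p && q p)).map f) := by
  intro l
  induction l with
  | nil => intro acc _; rfl
  | cons p l ih =>
    intro acc hacc
    by_cases hq : q p = true
    · by_cases hr : r p = true
      · rw [List.filter_cons_of_pos hq, List.filter_cons_of_pos (by simp [hq, hr]),
          List.map_cons, List.map_cons, dedupF_cons, dedupF_cons]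
        apply ih
        intro p' hp' hq' hr'
        exact mem_dstep_left _ _ (hacc p' (List.mem_cons_of_mem _ hp') hq' hr')
      · have hrf : r p = false := by simpa using hr
        have hm : f p ∈ acc := hacc p List.mem_cons_self hq hrf
        rw [List.filter_cons_of_pos hq, List.filter_cons_of_neg (by simp [hrf]),
          List.map_cons, dedupF_cons]
        have : dstep acc (f p) = acc := by
          unfold dstep; rw [if_pos (List.elem_eq_true_of_mem hm)]
        rw [this]
        exact ih acc (fun p' hp' => hacc p' (List.mem_cons_of_mem _ hp'))
    · have hqf : q p = false := by simpa using hq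
      rw [List.filter_cons_of_neg (by simp [hqf]), List.filter_cons_of_neg (by simp [hqf])]
      exact ih acc (fun p' hp' => hacc p' (List.mem_cons_of_mem _ hp'))

-- folding dedupF over blocks is dedupF of the concatenation
theorem foldl_dedup_flatMap {ι : Type} (g : ι → List String) :
    ∀ (xs : List ι) (acc : List String),
      xs.foldl (fun a i => dedupF a (g i)) acc = dedupF acc (xs.flatMap g) := by
  intro xs
  induction xs with
  | nil => intro acc; rfl
  | cons i xs ih => intro acc; rw [List.foldl_cons, List.flatMap_cons, dedupF_append, ih]

-- ---- range/indexing conversions ----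
theorem getD_drop_zero (L : List String) (n : Nat) : (L.drop n).getD 0 "" = L.getD n "" := by
  simp [List.getD_eq_getElem?_getD, List.getElem?_drop]

theorem getD_succ_drop (L : List String) (i : Nat) : L.getD (i + 1) "" = (L.drop 1).getD i "" := by
  cases L <;> simp

theorem rowHit_cons (s c : String) (row : List String) :
    rowHit (c :: row) s = (PySem.Str.isIn s c || rowHit row s) := by
  simp [rowHit]

theorem foldl_range_getD {α β : Type} (d : α) (f : β → α → β) :
    ∀ (l : List α) (acc : β),
      (List.range l.length).foldl (fun a j => f a (l.getD j d)) acc = l.foldl f acc := by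
  intro l
  induction l with
  | nil => intro acc; rfl
  | cons x l ih =>
    intro acc
    rw [List.length_cons, List.range_succ_eq_map, List.foldl_cons, List.foldl_map]
    simp only [List.getD_cons_zero, List.getD_cons_succ]
    exact ih _

theorem foldl_range_pairs {β : Type} (g : β → List String → String → β) :
    ∀ (M : List (List String)) (L : List String) (acc : β),
      (List.range M.length).foldl (fun a i => g a (M.getD i []) (L.getD i "")) acc
        = (pairsOf M L).foldl (fun a p => g a p.1 p.2) acc := by
  intro M
  induction M with
  | nil => intro L acc; rfl
  | cons row M' ih =>
    intro L acc
    rw [List.length_cons, List.range_succ_eq_map, List.foldl_cons, List.foldl_map]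
    simp only [List.getD_cons_zero, List.getD_cons_succ, pairsOf, List.foldl_cons,
      Nat.succ_eq_add_one, getD_succ_drop]
    exact ih (L.drop 1) _

-- ---- reduction of port A ----
theorem innerLoop_stay (s v : String) :
    ∀ (row : List String) (acc : List String), acc.contains v = true →
      row.foldl (fun a cell => if PySem.Str.isIn s cell && !(a.contains v) then a ++ [v] else a) acc
        = acc := by
  intro row
  induction row with
  | nil => intro acc _; rfl
  | cons c row ih => intro acc h; simp only [List.foldl_cons, h, Bool.not_true, Bool.and_false,
      Bool.false_eq_true, if_false]; exact ih acc h

theorem innerLoop_eq (s v : String) (row : List String) (acc : List String) :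
    (List.range row.length).foldl (fun a j =>
        if PySem.Str.isIn s (row.getD j "") && !(a.contains v) then a ++ [v] else a) acc
      = if rowHit row s && !(acc.contains v) then acc ++ [v] else acc := by
  rw [foldl_range_getD ""
    (fun a cell => if PySem.Str.isIn s cell && !(a.contains v) then a ++ [v] else a) row acc]
  induction row with
  | nil => simp [rowHit]
  | cons c row ih =>
    rw [List.foldl_cons]
    by_cases hv : acc.contains v = true
    · simp only [hv, Bool.not_true, Bool.and_false, Bool.false_eq_true, if_false]
      exact innerLoop_stay s v row acc hv
    · have hvf : acc.contains v = false := by simpa using hv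
      by_cases hc : PySem.Str.isIn s c = true
      · simp only [hc, hvf, Bool.not_false, Bool.and_self]
        have hr : rowHit (c :: row) s = true := by rw [rowHit_cons, hc, Bool.true_or]
        simp only [hr, Bool.and_self, if_true]
        exact innerLoop_stay s v row _
          (List.elem_eq_true_of_mem (List.mem_append_right _ (List.mem_singleton.2 rfl)))
      · have hcf : PySem.Str.isIn s c = false := by simpa using hc
        simp only [hcf, Bool.false_and, Bool.false_eq_true, if_false]
        rw [ih, rowHit_cons, hcf, Bool.false_or]

theorem portA_eq (S : List String) (M : List (List String)) (L : List String) :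
    ingredient_in_catalog S M L = dedupF [] (blocksA (pairsOf M L) S) := by
  unfold ingredient_in_catalog blocksA
  rw [← foldl_dedup_flatMap (fun s => ((pairsOf M L).filter (fun p => rowHit p.1 s)).map Prod.snd) S []]
  congr 1
  funext acc s
  have h1 : ∀ (a : List String) (i : Nat),
      (List.range ((M.getD i []).length)).foldl (fun a j =>
        if PySem.Str.isIn s ((M.getD i []).getD j "") && !(a.contains (L.getD i "")) then
          a ++ [L.getD i ""] else a) a
      = if rowHit (M.getD i []) s && !(a.contains (L.getD i "")) then a ++ [L.getD i ""] else a :=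
    fun a i => innerLoop_eq s (L.getD i "") (M.getD i []) a
  calc (List.range M.length).foldl (fun a i =>
        (List.range ((M.getD i []).length)).foldl (fun a j =>
          if PySem.Str.isIn s ((M.getD i []).getD j "") && !(a.contains (L.getD i "")) then
            a ++ [L.getD i ""] else a) a) acc
      = (List.range M.length).foldl (fun a i =>
          if rowHit (M.getD i []) s && !(a.contains (L.getD i "")) then a ++ [L.getD i ""] else a) acc := by
        apply PySem.List.foldl_congr_mem
        intro a i _
        exact h1 a i
    _ = (pairsOf M L).foldl (fun a p =>
          if rowHit p.1 s && !(a.contains p.2) then a ++ [p.2] else a) acc := by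
        exact foldl_range_pairs (fun a row v => if rowHit row s && !(a.contains v) then a ++ [v] else a) M L acc
    _ = dedupF acc (((pairsOf M L).filter (fun p => rowHit p.1 s)).map Prod.snd) := by
        exact foldl_guard_dedup (fun p => rowHit p.1 s) Prod.snd (pairsOf M L) acc

-- ---- reduction of port B ----
theorem pyFirstMatch_eq_fm (S : List String) (row : List String) :
    ∀ (k : Nat), pyFirstMatch S row k = (fm S row).map (· + k) := by
  induction S with
  | nil => intro k; rfl
  | cons s rest ih =>
    intro k
    show (if rowHit row s then some k else pyFirstMatch rest row (k + 1))
      = ((if rowHit row s then some 0 else (fm rest row).map (· + 1)).map (· + k))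
    by_cases h : rowHit row s = true
    · rw [if_pos h, if_pos h]; simp
    · rw [if_neg (by simp [h]), if_neg (by simp [h]), ih (k + 1)]
      cases hx : fm rest row <;> simp
      omega

def gB (S : List String) (l : List (List String × String)) (k : Nat) : List String :=
  (l.filter (fun p => fm S p.1 == some k)).map Prod.snd

theorem bucketsFold (S : List String) :
    ∀ (l : List (List String × String)) (bs : List (List String)),
      l.foldl (fun bs p => match fm S p.1 with
          | some k => bs.set k ((bs.getD k []) ++ [p.2])
          | none => bs) bs
        = bs.mapIdx (fun k b => b ++ gB S l k) := by
  intro l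
  induction l with
  | nil =>
    intro bs
    simp only [List.foldl_nil, gB, List.filter_nil, List.map_nil, List.append_nil]
    apply List.ext_getElem <;> simp
  | cons p l ih =>
    intro bs
    rw [List.foldl_cons]
    cases hfm : fm S p.1 with
    | none =>
      rw [ih]
      apply List.ext_getElem
      · simp
      · intro i h1 h2
        simp only [List.getElem_mapIdx, gB, List.filter_cons, hfm]
        simp
    | some k0 =>
      rw [ih]
      apply List.ext_getElem
      · simp
      · intro i h1 h2
        have hbs : i < bs.length := by simpa using h2
        simp only [List.getElem_mapIdx, List.getElem_set]
        by_cases hik : k0 = i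
        · subst hik
          rw [if_pos rfl, List.getD_eq_getElem bs [] hbs]
          have hgb : gB S (p :: l) k0 = p.2 :: gB S l k0 := by
            unfold gB
            rw [List.filter_cons_of_pos (by simp [hfm]), List.map_cons]
          rw [hgb, List.append_assoc, List.singleton_append]
        · have hgb : gB S (p :: l) i = gB S l i := by
            unfold gB
            rw [List.filter_cons_of_neg (by simp [hfm]; exact hik)]
          rw [if_neg hik, hgb]

theorem portB_eq (S : List String) (M : List (List String)) (L : List String) :
    ingredient_in_catalog_alt S M L
      = dedupF [] ((List.range S.length).flatMap (gB S (pairsOf M L))) := by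
  unfold ingredient_in_catalog_alt
  -- the enumerate fold over rows is a fold over pairsOf M L
  have henum : ∀ (M' : List (List String)) (n : Nat) (bs : List (List String)),
      (PySem.List.enumerate M' (n : Int)).foldl (fun bs p =>
          match pyFirstMatch S p.2 0 with
          | some k => bs.set k ((bs.getD k []) ++ [PySem.List.pyGetD L p.1 ""])
          | none => bs) bs
        = (pairsOf M' (L.drop n)).foldl (fun bs p =>
            match fm S p.1 with
            | some k => bs.set k ((bs.getD k []) ++ [p.2])
            | none => bs) bs := by
    intro M'
    induction M' with
    | nil => intro n bs; simp [pairsOf, PySem.List.enumerate_nil]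
    | cons row M'' ih =>
      intro n bs
      rw [PySem.List.enumerate_cons, List.foldl_cons]
      have hcast : (n : Int) + 1 = ((n + 1 : Nat) : Int) := by push_cast; ring
      rw [hcast, ih (n + 1)]
      simp only [pairsOf, List.foldl_cons]
      rw [pyFirstMatch_eq_fm, PySem.List.pyGetD_natCast, ← getD_drop_zero L n]
      have : (L.drop n).drop 1 = L.drop (n + 1) := by rw [List.drop_drop]
      rw [this]
      congr 1
      cases fm S row <;> simp
  dsimp only []
  have h0 : PySem.List.enumerate M (0 : Int) = PySem.List.enumerate M ((0 : Nat) : Int) := rfl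
  rw [h0, henum M 0 (S.map (fun _ => ([] : List String))), List.drop_zero, bucketsFold]
  -- initial buckets are |S| empty lists; the final buckets are the gB blocks
  have hbuckets : (S.map (fun _ => ([] : List String))).mapIdx
        (fun k b => b ++ gB S (pairsOf M L) k)
      = (List.range S.length).map (gB S (pairsOf M L)) := by
    apply List.ext_getElem
    · simp
    · intro i h1 h2
      simp [List.getElem_mapIdx]
  rw [hbuckets]
  -- the final double fold is dedupF over the flattened buckets
  have : ∀ (bks : List (List String)) (acc : List String),
      bks.foldl (fun r b => b.foldl (fun r line =>
        if r.contains line then r else r ++ [line]) r) acc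
      = bks.foldl (fun r b => dedupF r b) acc := by intro bks acc; rfl
  rw [this, List.foldl_map, foldl_dedup_flatMap]

-- ---- the main lemma: A's search-major dedup stream equals B's first-match-major one ----
theorem main_lemma :
    ∀ (S : List String) (l : List (List String × String)) (c : List String × String → Bool)
      (acc : List String), (∀ p ∈ l, c p = true → p.2 ∈ acc) →
      dedupF acc (blocksA l S) = dedupF acc (blocksB l S c) := by
  intro S
  induction S with
  | nil => intro l c acc _; rfl
  | cons s S' ih =>
    intro l c acc hacc
    unfold blocksA blocksB
    rw [List.flatMap_cons, List.length_cons, List.range_succ_eq_map, List.flatMap_cons,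
      List.flatMap_map, dedupF_append, dedupF_append]
    -- the k = 0 block of B is A's s-block restricted to uncovered rows
    have hb0 : (l.filter (fun p => !(c p) && (fm (s :: S') p.1 == some 0)))
        = l.filter (fun p => !(c p) && rowHit p.1 s) := by
      apply List.filter_congr
      intro p _
      by_cases h : rowHit p.1 s = true
      · simp [fm, h]
      · have hf : rowHit p.1 s = false := by simpa using h
        simp only [fm, hf, Bool.false_eq_true, if_false]
        cases hx : fm S' p.1 <;> simp
    have habs : dedupF acc ((l.filter (fun p => rowHit p.1 s)).map Prod.snd)
        = dedupF acc ((l.filter (fun p => !(c p) && rowHit p.1 s)).map Prod.snd) := by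
      apply dedupF_filter_absorb
      intro p hp hq hr
      have hc : c p = true := by simpa using hr
      exact hacc p hp hc
    set acc1 := dedupF acc ((l.filter (fun p => rowHit p.1 s)).map Prod.snd) with hacc1
    rw [hb0, ← habs]
    -- the shifted B blocks are the blocks of S' under the enlarged covered predicate
    have hshift : ((List.range S'.length).flatMap (fun k =>
          (l.filter (fun p => !(c p) && (fm (s :: S') p.1 == some (k + 1)))).map Prod.snd))
        = blocksB l S' (fun p => c p || rowHit p.1 s) := by
      unfold blocksB
      congr 1
      funext k
      congr 1
      apply List.filter_congr
      intro p _
      by_cases h : rowHit p.1 s = true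
      · simp [fm, h]
      · have hf : rowHit p.1 s = false := by simpa using h
        simp only [fm, hf, Bool.false_eq_true, if_false]
        cases hx : fm S' p.1 with
        | none => simp
        | some m =>
          have : ((some (m + 1) : Option Nat) == some (k + 1)) = ((some m : Option Nat) == some k) := by
            by_cases hmk : m = k <;> simp [hmk]
          simp [this]
    have hstep : ∀ p ∈ l, (c p || rowHit p.1 s) = true → p.2 ∈ acc1 := by
      intro p hp h
      rcases Bool.or_eq_true_iff.1 h with h | h
      · exact mem_dedupF_left _ _ (hacc p hp h)
      · apply mem_dedupF_right
        exact List.mem_map_of_mem (List.mem_filter.2 ⟨hp, h⟩)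
    have := ih l (fun p => c p || rowHit p.1 s) acc1 hstep
    unfold blocksA blocksB at this
    rw [hshift, this]
    rfl

-- ===== VERDICT (by name: the statement is the Claim_ definition above) =====
-- (Pre_ only excludes the inputs where the Python A raises IndexError; both ports render that
-- access total with the same default, so the ports are in fact equal without the hypothesis.)
theorem ingredient_in_catalog_spec : Claim_equal_ingredient_in_catalog := by
  intro S M L _ _
  show ingredient_in_catalog S M L = ingredient_in_catalog_alt S M L
  rw [portA_eq, portB_eq]
  have := main_lemma S (pairsOf M L) (fun _ => false) [] (by simp)
  rw [this]
  unfold blocksB gB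
  simp
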